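-- pv_equiv track=rewrite | github.com/ahaiceid/adventofcode.com | 2025/day/4/solver.py | remove_available_positions
-- ===== SOURCE A (Python) =====
-- def is_available_function(x,y,heat_map):
--     return heat_map[y][x]<4
--
-- def remove_available_positions(tp_map, heat_map):
--     new_map = []
--     removed_count = 0
--     for y in range(len(tp_map)):
--         new_row = ''
--         for x in range(len(tp_map[0])):
--             if tp_map[y][x]=='@' and is_available_function(x,y,heat_map):
--                 removed_count += 1
--                 new_row += '.'
--             else:
--                 new_row += tp_map[y][x]
--         new_map.append(new_row)
--     return new_map, removed_count
-- ===== SOURCE B (Python) =====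
-- def remove_available_positions(tp_map, heat_map):
--     w = len(tp_map[0]) if tp_map else 0
--     # pass 1: locate removals by searching each row for '@' with str.find,
--     # visiting only '@' cells instead of every cell
--     removals = []
--     for y in range(len(tp_map)):
--         row, start = tp_map[y], 0
--         while True:
--             x = row.find('@', start)
--             if x < 0 or x >= w:
--                 break
--             if heat_map[y][x] < 4:
--                 removals.append((y, x))
--             start = x + 1
--     # pass 2: copy the grid (width-w prefix of each row) and patch the found cells
--     new_map = [list(tp_map[y][:w]) for y in range(len(tp_map))]
--     for y, x in removals:
--         new_map[y][x] = '.'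
--     return [''.join(r) for r in new_map], len(removals)
-- ===== Notes on version B (the rewrite author's own statement) =====
-- stated objective: alternative
-- what changed: A rebuilds every cell in one fused nested loop testing each cell; B instead searches each row for '@' occurrences with str.find to collect a list of removal coordinates (count = its length), then copies the grid and patches exactly those coordinates to '.'.
import Mathlib
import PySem

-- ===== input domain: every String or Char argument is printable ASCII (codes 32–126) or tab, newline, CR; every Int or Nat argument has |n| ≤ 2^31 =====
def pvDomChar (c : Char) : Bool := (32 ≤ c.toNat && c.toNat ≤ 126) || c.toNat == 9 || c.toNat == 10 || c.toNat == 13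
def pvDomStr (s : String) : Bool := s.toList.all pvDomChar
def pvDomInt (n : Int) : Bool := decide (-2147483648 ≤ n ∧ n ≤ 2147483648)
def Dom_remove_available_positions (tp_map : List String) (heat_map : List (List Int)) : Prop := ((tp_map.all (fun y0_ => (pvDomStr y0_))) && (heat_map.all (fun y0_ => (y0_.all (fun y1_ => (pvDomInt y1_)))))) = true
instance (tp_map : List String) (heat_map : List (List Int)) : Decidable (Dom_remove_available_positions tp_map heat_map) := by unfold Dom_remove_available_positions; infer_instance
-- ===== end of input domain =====

-- B replaces A's cell-by-cell rebuild with str.find-based search for '@' cells plus patching; equivalence is about the return value.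

-- ===== PORT A =====
-- transliteration of A: one fused nested loop threading (new_map, removed_count);
-- in-range access is guaranteed by Pre_, so the total getD getters coincide with Python indexing there
def remove_available_positions (tp_map : List String) (heat_map : List (List Int)) : List String × Int :=
  let w := (tp_map.headD "").length
  (List.range tp_map.length).foldl
    (fun (acc : List String × Int) y =>
      let inner := (List.range w).foldl
        (fun (st : List Char × Int) x =>
          let c := (tp_map.getD y "").toList.getD x ' '
          if c == '@' && decide ((heat_map.getD y []).getD x 0 < 4) then
            (st.1 ++ ['.'], st.2 + 1)
          else
            (st.1 ++ [c], st.2))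
        ([], acc.2)
      (acc.1 ++ [String.ofList inner.1], inner.2))
    ([], 0)

-- ===== PORT B =====
-- Source B's inner while loop "x = row.find('@', start); if x < 0 or x >= w: break; …; start = x + 1",
-- made structurally recursive with fuel (w + 1 iterations always suffice: start strictly increases and stays ≤ w)
def rapScanRow (row : List Char) (heat : List Int) (w : Nat) : Nat → Nat → List Nat
  | 0, _ => []
  | fuel+1, start =>
    let x := PySem.Chars.findFrom row ['@'] (start : Int)
    if 0 ≤ x ∧ x < (w : Int) then
      (if heat.getD x.toNat 0 < 4 then [x.toNat] else []) ++ rapScanRow row heat w fuel (x.toNat + 1)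
    else []

-- transliteration of B: collect removal coordinates by find-search, copy the grid, patch, join
def remove_available_positions_alt (tp_map : List String) (heat_map : List (List Int)) : List String × Int :=
  let w := (tp_map.headD "").length
  let removals : List (Nat × Nat) :=
    (List.range tp_map.length).foldl
      (fun acc y =>
        acc ++ (rapScanRow (tp_map.getD y "").toList (heat_map.getD y []) w (w + 1) 0).map (fun x => (y, x)))
      []
  let base : List (List Char) := (List.range tp_map.length).map (fun y => (tp_map.getD y "").toList.take w)
  let patched := removals.foldl (fun rows (p : Nat × Nat) => rows.modify p.1 (fun r => r.set p.2 '.')) base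
  (patched.map String.ofList, (removals.length : Int))

-- ===== PRECONDITION & SPEC =====
-- Pre_ excludes exactly the inputs where Python A raises IndexError: a row shorter than row 0
-- (tp_map[y][x]), or an '@' cell whose heat_map entry does not exist (heat_map[y][x]).
def Pre_remove_available_positions (tp_map : List String) (heat_map : List (List Int)) : Prop :=
  ∀ y ∈ List.range tp_map.length,
    (tp_map.headD "").length ≤ (tp_map.getD y "").length ∧
    ∀ x ∈ List.range (tp_map.headD "").length,
      (tp_map.getD y "").toList.getD x ' ' = '@' →
        y < heat_map.length ∧ x < (heat_map.getD y []).length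
instance (tp_map : List String) (heat_map : List (List Int)) : Decidable (Pre_remove_available_positions tp_map heat_map) := by unfold Pre_remove_available_positions; infer_instance

def pvWitness_remove_available_positions : List String × List (List Int) :=
  (["@..", ".@#"], [[3, 5, 0], [9, 2, 1]])

def Spec_remove_available_positions (tp_map : List String) (heat_map : List (List Int)) (out : List String × Int) : Prop := out = remove_available_positions_alt tp_map heat_map
instance (tp_map : List String) (heat_map : List (List Int)) (out : List String × Int) : Decidable (Spec_remove_available_positions tp_map heat_map out) := by unfold Spec_remove_available_positions; infer_instance

-- ===== CLAIM (what is proved, stated in full; the proofs are below) =====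
def Claim_equal_remove_available_positions : Prop := ∀ (tp_map : List String) (heat_map : List (List Int)), Dom_remove_available_positions tp_map heat_map → Pre_remove_available_positions tp_map heat_map → Spec_remove_available_positions tp_map heat_map (remove_available_positions tp_map heat_map)

-- ===== LEMMAS AND PROOFS =====

def rapRemoved (tp_map : List String) (heat_map : List (List Int)) (y x : Nat) : Bool :=
  ((tp_map.getD y "").toList.getD x ' ' == '@') && decide ((heat_map.getD y []).getD x 0 < 4)

-- the inner loop of A builds the mapped row and adds the per-row count
theorem rap_inner (tp_map : List String) (heat_map : List (List Int)) (y : Nat)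
    (l : List Nat) (r0 : List Char) (c0 : Int) :
    l.foldl
      (fun (st : List Char × Int) x =>
        let c := (tp_map.getD y "").toList.getD x ' '
        if c == '@' && decide ((heat_map.getD y []).getD x 0 < 4) then
          (st.1 ++ ['.'], st.2 + 1)
        else
          (st.1 ++ [c], st.2))
      (r0, c0)
    = (r0 ++ l.map (fun x => if rapRemoved tp_map heat_map y x then '.'
                             else (tp_map.getD y "").toList.getD x ' '),
       c0 + (l.countP (fun x => rapRemoved tp_map heat_map y x) : Int)) := by
  induction l generalizing r0 c0 with
  | nil => simp
  | cons a t ih =>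
    by_cases h : rapRemoved tp_map heat_map y a
    · simp only [List.foldl_cons, List.map_cons, List.countP_cons]
      rw [ih]
      simp [rapRemoved] at h
      simp only [rapRemoved, Prod.mk.injEq]
      refine ⟨by simp [h], by simp [h]; ring⟩
    · simp only [List.foldl_cons, List.map_cons, List.countP_cons]
      rw [ih]
      simp only [rapRemoved, Bool.and_eq_true, beq_iff_eq, decide_eq_true_eq,
        List.getD_eq_getElem?_getD] at h
      simp only [rapRemoved, Prod.mk.injEq]
      refine ⟨by simp [h], by simp [h]⟩

-- the outer loop of A appends the mapped rows and sums the per-row counts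
theorem rap_outer (tp_map : List String) (heat_map : List (List Int)) (w : Nat)
    (l : List Nat) (m0 : List String) (c0 : Int) :
    l.foldl
      (fun (acc : List String × Int) y =>
        let inner := (List.range w).foldl
          (fun (st : List Char × Int) x =>
            let c := (tp_map.getD y "").toList.getD x ' '
            if c == '@' && decide ((heat_map.getD y []).getD x 0 < 4) then
              (st.1 ++ ['.'], st.2 + 1)
            else
              (st.1 ++ [c], st.2))
          ([], acc.2)
        (acc.1 ++ [String.ofList inner.1], inner.2))
      (m0, c0)
    = (m0 ++ l.map (fun y => String.ofList ((List.range w).map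
          (fun x => if rapRemoved tp_map heat_map y x then '.'
                    else (tp_map.getD y "").toList.getD x ' '))),
       c0 + (l.map (fun y => ((List.range w).countP (fun x => rapRemoved tp_map heat_map y x) : Int))).sum) := by
  induction l generalizing m0 c0 with
  | nil => simp
  | cons a t ih =>
    simp only [List.foldl_cons, List.map_cons, List.sum_cons]
    rw [rap_inner]
    simp only []
    rw [ih]
    simp only [Prod.mk.injEq]
    refine ⟨by simp, by ring⟩

-- findFrom past the end of the string is -1
theorem rap_findFrom_past (row sub : List Char) (k : Nat) (h : row.length < k) :
    PySem.Chars.findFrom row sub (k : Int) = -1 := by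
  simp only [PySem.Chars.findFrom]
  split_ifs with h1 h2 <;> first | rfl | (exfalso; omega) | omega

theorem rap_single_prefix (c : Char) (l : List Char) (i : Nat) :
    ([c] <+: l.drop i) ↔ l[i]? = some c := by
  rw [← List.head?_drop]
  cases l.drop i with
  | nil => simp
  | cons a t => simp [List.cons_prefix_cons, eq_comm]

theorem rap_single_infix (c : Char) (l : List Char) : ([c] <:+: l) ↔ c ∈ l := by
  constructor
  · rintro ⟨s, t, rfl⟩; simp
  · intro h
    obtain ⟨s, t, rfl⟩ := List.append_of_mem h
    exact ⟨s, t, by simp⟩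

-- the while loop of Source B collects exactly the removable positions in [start, w), in order
theorem rapScanRow_spec (row : List Char) (heat : List Int) (w : Nat) :
    ∀ fuel start, w ≤ fuel + start →
      rapScanRow row heat w fuel start
        = (List.range' start (w - start)).filter
            (fun i => (row[i]? == some '@') && decide (heat.getD i 0 < 4)) := by
  intro fuel
  induction fuel with
  | zero =>
    intro start h
    have hz : w - start = 0 := by omega
    simp [rapScanRow, hz]
  | succ fuel ih =>
    intro start h
    by_cases hlen : row.length < start
    · have hx : PySem.Chars.findFrom row ['@'] (start : Int) = -1 := rap_findFrom_past _ _ _ hlen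
      rw [rapScanRow]
      simp only [hx]
      rw [if_neg (by omega)]
      symm
      rw [List.filter_eq_nil_iff]
      intro i hi
      have := List.mem_range'_1.mp hi
      have : row[i]? = none := by
        apply List.getElem?_eq_none
        omega
      simp [this]
    · push_neg at hlen
      by_cases hneg : PySem.Chars.findFrom row ['@'] (start : Int) = -1
      · have hno : ¬ ['@'] <:+: row.drop start :=
          (PySem.Chars.findFrom_natCast_eq_neg_one_iff row ['@'] start hlen).mp hneg
        rw [rapScanRow]
        simp only [hneg]
        rw [if_neg (by omega)]
        symm
        rw [List.filter_eq_nil_iff]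
        intro i hi
        have hir := List.mem_range'_1.mp hi
        by_cases hhit : row[i]? = some '@'
        · exfalso
          apply hno
          rw [rap_single_infix]
          have : (row.drop start)[i - start]? = some '@' := by
            rw [List.getElem?_drop]
            rwa [show start + (i - start) = i by omega]
          exact List.mem_of_getElem? this
        · simp [hhit]
      · obtain ⟨hge, hpre, hmin⟩ :=
          PySem.Chars.findFrom_natCast_spec row ['@'] start hlen hneg
        set x := PySem.Chars.findFrom row ['@'] (start : Int) with hxdef
        clear_value x
        have hx0 : 0 ≤ x := le_trans (by exact_mod_cast Int.ofNat_nonneg start) hge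
        have hhit : row[x.toNat]? = some '@' := (rap_single_prefix _ _ _).mp hpre
        have hgeN : start ≤ x.toNat := by omega
        have hnohit : ∀ i, start ≤ i → i < x.toNat → row[i]? ≠ some '@' := by
          intro i h1 h2 hc
          exact hmin i h1 h2 ((rap_single_prefix _ _ _).mpr hc)
        by_cases hw : x < (w : Int)
        · have hxw : x.toNat < w := by omega
          rw [rapScanRow]
          rw [← hxdef]
          rw [if_pos ⟨hx0, hw⟩]
          rw [ih (x.toNat + 1) (by omega)]
          -- split the range at x.toNat
          have hsplit : List.range' start (w - start)
              = List.range' start (x.toNat - start) ++ List.range' x.toNat (w - x.toNat) := by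
            have hra := @List.range'_append start (x.toNat - start) (w - x.toNat) 1
            rw [show start + 1 * (x.toNat - start) = x.toNat by omega] at hra
            rw [hra]
            congr 1
            omega
          rw [hsplit, List.filter_append]
          have hfirst : (List.range' start (x.toNat - start)).filter
              (fun i => (row[i]? == some '@') && decide (heat.getD i 0 < 4)) = [] := by
            rw [List.filter_eq_nil_iff]
            intro i hi
            have := List.mem_range'_1.mp hi
            have : row[i]? ≠ some '@' := hnohit i (by omega) (by omega)
            simp [this]
          rw [hfirst, List.nil_append]
          rw [show w - x.toNat = (w - x.toNat - 1) + 1 by omega, List.range'_succ,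
              List.filter_cons]
          rw [show w - (x.toNat + 1) = w - x.toNat - 1 by omega]
          by_cases hh : heat[x.toNat]?.getD 0 < 4 <;>
            simp [hh, hhit, List.getD_eq_getElem?_getD]
        · rw [rapScanRow]
          rw [← hxdef]
          rw [if_neg (by push_neg; intro _; omega)]
          symm
          rw [List.filter_eq_nil_iff]
          intro i hi
          have := List.mem_range'_1.mp hi
          have : row[i]? ≠ some '@' := hnohit i (by omega) (by omega)
          simp [this]

theorem rap_modify_id {α : Type} (l : List α) (i : Nat) : l.modify i (fun a => a) = l := by
  apply List.ext_getElem?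
  intro j
  simp [List.getElem?_modify]

theorem rap_modify_modify {α : Type} (l : List α) (i : Nat) (f g : α → α) :
    (l.modify i f).modify i g = l.modify i (fun a => g (f a)) := by
  apply List.ext_getElem?
  intro j
  simp only [List.getElem?_modify]
  cases l[j]? with
  | none => simp
  | some a => by_cases h : i = j <;> simp [h]

-- a group of removals tagged with the same row index y folds to one modify of row y
theorem rap_group (y : Nat) (xs : List Nat) (rows : List (List Char)) :
    (xs.map (fun x => (y, x))).foldl
        (fun rows (p : Nat × Nat) => rows.modify p.1 (fun r => r.set p.2 '.')) rows
      = rows.modify y (fun r => xs.foldl (fun r x => r.set x '.') r) := by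
  induction xs generalizing rows with
  | nil => simp [rap_modify_id]
  | cons a t ih =>
    simp only [List.map_cons, List.foldl_cons]
    rw [ih, rap_modify_modify]

theorem rap_foldl_append {α β : Type} (g : β → List α) :
    ∀ (l : List β) (acc : List α),
      l.foldl (fun a y => a ++ g y) acc = acc ++ l.flatMap g := by
  intro l
  induction l with
  | nil => simp
  | cons a t ih => intro acc; simp [ih, List.append_assoc]

theorem rap_foldl_flatMap {α β σ : Type} (g : β → List α) (f : σ → α → σ) :
    ∀ (l : List β) (init : σ),
      (l.flatMap g).foldl f init = l.foldl (fun acc y => (g y).foldl f acc) init := by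
  intro l
  induction l with
  | nil => simp
  | cons a t ih => intro init; simp [List.flatMap_cons, List.foldl_append, ih]

-- folding row-modifications over distinct row indices, read back pointwise
theorem rap_fold_modify_get {α : Type} (F : Nat → α → α) :
    ∀ (ys : List Nat), ys.Nodup → ∀ (rows : List α) (i : Nat),
      (ys.foldl (fun rows y => rows.modify y (F y)) rows)[i]?
        = if i ∈ ys then rows[i]?.map (F i) else rows[i]? := by
  intro ys
  induction ys with
  | nil => simp
  | cons a t ih =>
    intro hnd rows i
    simp only [List.foldl_cons]
    rw [ih (List.Nodup.of_cons hnd) _ i]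
    have hna := (List.nodup_cons.mp hnd).1
    by_cases hit : i ∈ t <;> by_cases hia : a = i <;>
      cases hrow : rows[i]? <;>
      simp_all [List.getElem?_modify] <;>
      intro h <;>
      exact absurd h.symm hia

-- folding '.'-sets over a list of positions, read back pointwise
theorem rap_set_fold_get (ps : List Nat) :
    ∀ (r : List Char) (i : Nat),
      (ps.foldl (fun r x => r.set x '.') r)[i]?
        = if i ∈ ps ∧ i < r.length then some '.' else r[i]? := by
  induction ps with
  | nil => simp
  | cons a t ih =>
    intro r i
    simp only [List.foldl_cons]
    rw [ih, List.length_set]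
    by_cases h1 : i ∈ t <;> by_cases h2 : a = i <;> by_cases h3 : i < r.length <;>
      simp_all [List.getElem?_set, List.mem_cons] <;>
      intro h <;>
      first
        | exact absurd h.symm h2
        | omega

theorem rap_getD_lt {α : Type} (l : List α) (i : Nat) (d : α) (h : i < l.length) :
    l.getD i d = l[i] := by
  simp [List.getD_eq_getElem?_getD, List.getElem?_eq_getElem h]

theorem rap_cast_sum (l : List Nat) (f : Nat → Nat) :
    (l.map (fun y => (f y : Int))).sum = ((l.map f).sum : Int) := by
  induction l with
  | nil => simp
  | cons a t ih => simp [ih]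

-- ===== VERDICT (by name: the statement is the Claim_ definition above) =====
theorem remove_available_positions_spec : Claim_equal_remove_available_positions := by
  intro tp_map heat_map _ hpre
  unfold Spec_remove_available_positions remove_available_positions remove_available_positions_alt
  rw [rap_outer]
  simp only [List.nil_append, zero_add]
  -- abbreviations
  rw [rap_foldl_append]
  rw [List.nil_append]
  rw [rap_foldl_flatMap]
  have hw : ∀ y ∈ List.range tp_map.length,
      (tp_map.headD "").length ≤ ((tp_map.getD y "").toList).length := by
    intro y hy
    simpa using (hpre y hy).1
  -- rewrite each row's scan result as a filter
  have hscan : ∀ y,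
      rapScanRow (tp_map.getD y "").toList (heat_map.getD y [])
          (tp_map.headD "").length ((tp_map.headD "").length + 1) 0
        = (List.range (tp_map.headD "").length).filter
            (fun i => (((tp_map.getD y "").toList)[i]? == some '@')
              && decide (((heat_map.getD y []).getD i 0) < 4)) := by
    intro y
    rw [rapScanRow_spec _ _ _ ((tp_map.headD "").length + 1) 0 (by omega)]
    rw [List.range_eq_range']
    simp [List.getD_eq_getElem?_getD]
  refine Prod.ext ?_ ?_
  · -- the grid component
    simp only [rap_group]
    have hpatch :
        (List.range tp_map.length).foldl
            (fun rows y => rows.modify y (fun r =>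
              ((rapScanRow (tp_map.getD y "").toList (heat_map.getD y [])
                  (tp_map.headD "").length ((tp_map.headD "").length + 1) 0)).foldl
                (fun r x => r.set x '.') r))
            ((List.range tp_map.length).map (fun y => (tp_map.getD y "").toList.take (tp_map.headD "").length))
          = (List.range tp_map.length).map
              (fun y => (List.range (tp_map.headD "").length).map
                (fun x => if rapRemoved tp_map heat_map y x then '.'
                          else (tp_map.getD y "").toList.getD x ' ')) := by
      apply List.ext_getElem?
      intro j
      rw [rap_fold_modify_get _ _ (List.nodup_range)]
      by_cases hj : j < tp_map.length
      · have hjm : j ∈ List.range tp_map.length := List.mem_range.mpr hj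
        rw [if_pos hjm]
        rw [List.getElem?_map, List.getElem?_map, List.getElem?_range hj]
        simp only [Option.map_some]
        congr 1
        -- per-row equality
        have hwy := hw j hjm
        apply List.ext_getElem?
        intro i
        rw [rap_set_fold_get, hscan j]
        rw [List.length_take]
        by_cases hi : i < (tp_map.headD "").length
        · have hilen : i < ((tp_map.getD j "").toList).length := by omega
          have htake : ((tp_map.getD j "").toList.take (tp_map.headD "").length)[i]?
              = some ((tp_map.getD j "").toList.getD i ' ') := by
            rw [List.getElem?_take, if_pos hi, List.getElem?_eq_getElem hilen,
                rap_getD_lt _ _ _ hilen]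
          have hi2 : i < (tp_map.head?.getD "").length := by simpa using hi
          have hilen' : i < ((tp_map[j]?.getD "").toList).length := by
            simpa [List.getD_eq_getElem?_getD] using hilen
          have hmem : (i ∈ (List.range (tp_map.headD "").length).filter
              (fun i => (((tp_map.getD j "").toList)[i]? == some '@')
                && decide (((heat_map.getD j []).getD i 0) < 4)))
              ↔ rapRemoved tp_map heat_map j i = true := by
            rw [List.mem_filter, List.mem_range]
            unfold rapRemoved
            simp only [List.getD_eq_getElem?_getD]
            rw [List.getElem?_eq_getElem hilen']
            simp [hi2]
          rw [List.getElem?_map, List.getElem?_range hi]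
          simp only [Option.map_some]
          by_cases hrem : rapRemoved tp_map heat_map j i = true
          · rw [if_pos ⟨hmem.mpr hrem, by omega⟩]
            simp [hrem]
          · rw [if_neg (fun hc => hrem (hmem.mp hc.1))]
            rw [htake]
            simp [hrem]
        · have hnotin : ¬ ((i ∈ (List.range (tp_map.headD "").length).filter
              (fun i => (((tp_map.getD j "").toList)[i]? == some '@')
                && decide (((heat_map.getD j []).getD i 0) < 4))) ∧
              i < min (tp_map.headD "").length ((tp_map.getD j "").toList).length) := by
            intro hc
            exact hi (List.mem_range.mp (List.mem_filter.mp hc.1).1)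
          rw [if_neg hnotin]
          rw [List.getElem?_take]
          rw [if_neg hi]
          rw [List.getElem?_map]
          have hr : (List.range (tp_map.headD "").length)[i]? = none := by
            apply List.getElem?_eq_none
            simpa using hi
          rw [hr]
          rfl
      · have hjm : j ∉ List.range tp_map.length := by simp [List.mem_range]; omega
        rw [if_neg hjm]
        rw [List.getElem?_map, List.getElem?_map]
        have hr : (List.range tp_map.length)[j]? = none := by
          apply List.getElem?_eq_none
          simpa using hj
        rw [hr]
        rfl
    rw [hpatch, List.map_map]
    rfl
  · -- the count component
    rw [List.length_flatMap]
    have : ∀ y ∈ List.range tp_map.length,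
        ((rapScanRow (tp_map.getD y "").toList (heat_map.getD y [])
            (tp_map.headD "").length ((tp_map.headD "").length + 1) 0).map
          (fun x => (y, x))).length
        = (List.range (tp_map.headD "").length).countP
            (fun x => rapRemoved tp_map heat_map y x) := by
      intro y hy
      have hwy := hw y hy
      rw [List.length_map, hscan y, List.countP_eq_length_filter]
      congr 1
      apply List.filter_congr
      intro i hi
      have hilen : i < ((tp_map.getD y "").toList).length := by
        have := List.mem_range.mp hi; omega
      unfold rapRemoved
      rw [List.getElem?_eq_getElem hilen, rap_getD_lt _ _ _ hilen]
      simp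
    rw [List.map_congr_left this]
    rw [← rap_cast_sum]
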